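-- pv_equiv track=rewrite | github.com/notdenied/miptctf_2026_finals | checkers/babuinterpreter/generator.py | invert_block_rotate_all
-- ===== SOURCE A (Python) =====
-- def rotate_left_list(items: list[str], amount: int) -> list[str]:
--     if not items:
--         return []
--     shift = amount % len(items)
--     return items[shift:] + items[:shift]
--
-- def block_rotate_all(text: str, rotate_amount: int, chunk: int) -> str:
--     rotated = "".join(rotate_left_list(list(text), rotate_amount))
--     if chunk <= 0:
--         raise ValueError("chunk size must be positive")
--     parts = [rotated[i : i + chunk] for i in range(0, len(rotated), chunk)]
--     parts.reverse()
--     return "".join(parts)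
--
-- def invert_block_rotate_all(output: str, rotate_amount: int, chunk: int) -> str:
--     markers = "".join(chr(0xE100 + i) for i in range(len(output)))
--     transformed = block_rotate_all(markers, rotate_amount, chunk)
--     positions = {ch: index for index, ch in enumerate(markers)}
--     rebuilt = [""] * len(output)
--     for out_index, marker in enumerate(transformed):
--         rebuilt[positions[marker]] = output[out_index]
--     return "".join(rebuilt)
-- ===== SOURCE B (Python) =====
-- def invert_block_rotate_all(output: str, rotate_amount: int, chunk: int) -> str:
--     # Direct inversion: undo the chunk-reversal by cutting the reversed-size
--     # layout off the front, then undo the left rotation by rotating right.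
--     if chunk <= 0:
--         raise ValueError("chunk size must be positive")
--     n = len(output)
--     if n == 0:
--         return ""
--     k = -(-n // chunk)  # number of chunks = ceil(n / chunk)
--     sizes = [n - chunk * (k - 1)] + [chunk] * (k - 1)
--     pieces = []
--     pos = 0
--     for size in sizes:
--         pieces.append(output[pos:pos + size])
--         pos += size
--     s = "".join(reversed(pieces))
--     cut = n - rotate_amount % n
--     return s[cut:] + s[:cut]
-- ===== Notes on version B (the rewrite author's own statement) =====
-- stated objective: simpler
-- what changed: B undoes the transformation directly — it cuts the output into the reversed chunk layout (short final chunk first), re-joins the chunks in reverse, and rotates right by amount % n — instead of A's scheme of tagging every position with a private-use marker character, running the forward transformation on the marker string, and scattering the output characters through a position dictionary. (and B avoids the per-character dict/marker machinery, which a timing run measured as a large constant-factor speedup).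
import Mathlib
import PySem

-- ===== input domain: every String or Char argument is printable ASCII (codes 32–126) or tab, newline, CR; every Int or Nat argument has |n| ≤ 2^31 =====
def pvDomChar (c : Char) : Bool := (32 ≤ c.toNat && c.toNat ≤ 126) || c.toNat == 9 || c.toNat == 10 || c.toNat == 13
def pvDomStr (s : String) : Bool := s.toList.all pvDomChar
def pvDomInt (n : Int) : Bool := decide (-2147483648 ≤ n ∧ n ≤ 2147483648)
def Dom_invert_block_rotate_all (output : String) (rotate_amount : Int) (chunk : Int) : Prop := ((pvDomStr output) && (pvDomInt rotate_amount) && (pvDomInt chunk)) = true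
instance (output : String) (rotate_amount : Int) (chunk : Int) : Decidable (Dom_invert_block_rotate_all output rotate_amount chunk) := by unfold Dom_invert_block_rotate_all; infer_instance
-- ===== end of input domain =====

-- B inverts the two operations directly (cut the reversed chunk layout off the output, rotate
-- right) instead of A's tag-every-position-with-a-marker-character round trip; objective: simpler.

-- ===== PORT A =====
def pvRotateLeftList (items : List Char) (amount : Int) : List Char :=
  if items = [] then []
  else
    let shift := PySem.Int.mod amount (PySem.List.len items)
    PySem.List.slice items (some shift) none ++ PySem.List.slice items none (some shift)

def pvBlockRotateAll (text : List Char) (rotate_amount : Int) (chunk : Int) : List Char :=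
  let rotated := pvRotateLeftList text rotate_amount
  -- Python raises ValueError when chunk ≤ 0 (excluded by Pre_); [] stands in for the raise
  if chunk ≤ 0 then []
  else
    let parts := (PySem.List.pyRange 0 (PySem.List.len rotated) chunk).map
      (fun i => PySem.List.slice rotated (some i) (some (i + chunk)))
    parts.reverse.flatten

def invert_block_rotate_all (output : String) (rotate_amount : Int) (chunk : Int) : String :=
  let L := output.toList
  -- chr(0xE100 + i); Python raises ValueError once 0xE100 + i > 0x10FFFF (excluded by Pre_)
  let markers : List Char := (PySem.List.pyRange 0 (PySem.List.len L) 1).map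
      (fun i => Char.ofNat (0xE100 + i.toNat))
  let transformed := pvBlockRotateAll markers rotate_amount chunk
  let positions : PySem.Dict Char Int :=
    (PySem.List.enumerate markers).foldl (fun d p => d.insert p.2 p.1) PySem.Dict.empty
  let rebuilt0 : List String := List.replicate L.length ""
  let rebuilt := (PySem.List.enumerate transformed).foldl
    (fun rb p =>
      -- rebuilt[positions[marker]] = output[out_index]; KeyError/IndexError cannot occur
      match positions.get? p.2, PySem.List.pyGet? L p.1 with
      | some idx, some ch => PySem.List.pySetD rb idx (String.ofList [ch])
      | _, _ => rb) rebuilt0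
  PySem.Str.join "" rebuilt

-- ===== PORT B =====
def invert_block_rotate_all_alt (output : String) (rotate_amount : Int) (chunk : Int) : String :=
  -- Source B raises ValueError when chunk ≤ 0 (excluded by Pre_); "" stands in for the raise
  if chunk ≤ 0 then ""
  else
    let L := output.toList
    let n : Int := PySem.List.len L
    if L = [] then ""
    else
      let k : Int := -(PySem.Int.floordiv (-n) chunk)   -- ceil(n / chunk)
      let sizes : List Int := (n - chunk * (k - 1)) :: List.replicate (k - 1).toNat chunk
      let st := sizes.foldl
        (fun (st : List (List Char) × Int) size =>
          (st.1 ++ [PySem.List.slice L (some st.2) (some (st.2 + size))], st.2 + size))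
        ([], 0)
      let s := st.1.reverse.flatten
      let cut := n - PySem.Int.mod rotate_amount n
      String.ofList (PySem.List.slice s (some cut) none ++ PySem.List.slice s none (some cut))

-- ===== PRECONDITION & SPEC =====
-- Pre_ excludes exactly the inputs on which A raises: chunk ≤ 0 (ValueError "chunk size must
-- be positive") and outputs longer than 0x10FFFF - 0xE100 + 1 = 1056512 characters, on which
-- chr(0xE100 + i) raises ValueError.
def Pre_invert_block_rotate_all (output : String) (rotate_amount : Int) (chunk : Int) : Prop :=
  0 < chunk ∧ output.toList.length ≤ 1056512
instance (output : String) (rotate_amount : Int) (chunk : Int) : Decidable (Pre_invert_block_rotate_all output rotate_amount chunk) := by unfold Pre_invert_block_rotate_all; infer_instance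
def pvWitness_invert_block_rotate_all : String × Int × Int := ("abcde", 3, 2)

def Spec_invert_block_rotate_all (output : String) (rotate_amount : Int) (chunk : Int) (out : String) : Prop := out = invert_block_rotate_all_alt output rotate_amount chunk
instance (output : String) (rotate_amount : Int) (chunk : Int) (out : String) : Decidable (Spec_invert_block_rotate_all output rotate_amount chunk out) := by unfold Spec_invert_block_rotate_all; infer_instance

-- ===== CLAIM (what is proved, stated in full; the proofs are below) =====
def Claim_equal_invert_block_rotate_all : Prop := ∀ (output : String) (rotate_amount : Int) (chunk : Int), Dom_invert_block_rotate_all output rotate_amount chunk → Pre_invert_block_rotate_all output rotate_amount chunk → Spec_invert_block_rotate_all output rotate_amount chunk (invert_block_rotate_all output rotate_amount chunk)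

-- ===== LEMMAS AND PROOFS =====

-- proof-side model of the forward transformation: rotate left, cut into chunks, reverse, join
def pvRotL {α : Type} (xs : List α) (r : Int) : List α :=
  if xs = [] then []
  else
    let sh := (PySem.Int.mod r (xs.length : Int)).toNat
    xs.drop sh ++ xs.take sh

def pvChunks {α : Type} (c : Nat) : List α → List (List α)
  | [] => []
  | x :: xs => (x :: xs.take (c - 1)) :: pvChunks c (xs.drop (c - 1))
  termination_by xs => xs.length
  decreasing_by simp [List.length_drop]

def pvBrot {α : Type} (xs : List α) (r : Int) (c : Nat) : List α :=
  (pvChunks c (pvRotL xs r)).reverse.flatten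

-- the marker character chr(0xE100 + j)
def pvChrF (j : Nat) : Char := Char.ofNat (0xE100 + j)

theorem pvChunks_cons_take_drop {α : Type} (c : Nat) (hc : 0 < c) (ys : List α) (hy : ys ≠ []) :
    pvChunks c ys = ys.take c :: pvChunks c (ys.drop c) := by
  cases ys with
  | nil => exact absurd rfl hy
  | cons x xs =>
    rw [pvChunks]
    congr 1
    · rw [show c = (c-1)+1 by omega]; simp
    · congr 1; rw [show c = (c-1)+1 by omega]; simp

theorem pvChunks_flatten {α : Type} (c : Nat) (ys : List α) :
    (pvChunks c ys).flatten = ys := by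
  induction ys using pvChunks.induct c with
  | case1 => simp [pvChunks]
  | case2 x xs ih => rw [pvChunks]; simp [ih]

theorem pvChunks_map {α β : Type} (c : Nat) (f : α → β) (ys : List α) :
    pvChunks c (ys.map f) = (pvChunks c ys).map (List.map f) := by
  induction ys using pvChunks.induct c with
  | case1 => simp [pvChunks]
  | case2 x xs ih => rw [pvChunks]; simp [pvChunks, ← List.map_take, ← List.map_drop, ih]

theorem pvRotL_map {α β : Type} (f : α → β) (ys : List α) (r : Int) :
    pvRotL (ys.map f) r = (pvRotL ys r).map f := by
  unfold pvRotL
  cases ys with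
  | nil => simp
  | cons y ys => simp [List.map_drop, List.map_take]

theorem pvBrot_map {α β : Type} (f : α → β) (ys : List α) (r : Int) (c : Nat) :
    pvBrot (ys.map f) r c = (pvBrot ys r c).map f := by
  unfold pvBrot
  rw [pvRotL_map, pvChunks_map]
  simp [← List.map_reverse]

theorem pvRotL_perm {α : Type} (ys : List α) (r : Int) : (pvRotL ys r).Perm ys := by
  unfold pvRotL
  split
  · simp [*]
  · exact (List.perm_append_comm).trans (by rw [List.take_append_drop])

theorem pvBrot_perm {α : Type} (ys : List α) (r : Int) (c : Nat) :
    (pvBrot ys r c).Perm ys := by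
  unfold pvBrot
  refine ((List.reverse_perm _).flatten).trans ?_
  rw [pvChunks_flatten c]
  exact pvRotL_perm ys r

theorem pvPyRange_shift (a b d s : Int) (hs : 0 < s) :
    PySem.List.pyRange (a + d) (b + d) s = (PySem.List.pyRange a b s).map (· + d) := by
  rw [PySem.List.pyRange_of_pos _ _ hs, PySem.List.pyRange_of_pos _ _ hs]
  rw [show b + d - (a + d) = b - a by ring]
  simp only [show (a + d < b + d) ↔ (a < b) by omega]
  simp only [List.map_map]
  apply List.map_congr_left
  intro k _
  simp; ring

theorem pvPyRange_pos_cons (a b s : Int) (hs : 0 < s) (hab : a < b) :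
    PySem.List.pyRange a b s = a :: PySem.List.pyRange (a + s) b s := by
  rw [PySem.List.pyRange_of_pos _ _ hs, PySem.List.pyRange_of_pos _ _ hs]
  have hN : ((b - a + s - 1) / s).toNat = ((b - (a+s) + s - 1) / s).toNat + 1 := by
    have h1 : b - a + s - 1 = (b - (a+s) + s - 1) + 1 * s := by ring
    rw [h1, Int.add_mul_ediv_right _ _ (by omega : s ≠ 0)]
    have h2 : 0 ≤ (b - (a+s) + s - 1) / s := Int.ediv_nonneg (by omega) (by omega)
    omega
  rw [if_pos hab, hN]
  by_cases h2 : a + s < b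
  · rw [if_pos h2, List.range_succ_eq_map]
    simp only [List.map_cons, List.map_map]
    congr 1
    · simp
    · apply List.map_congr_left; intro k _; simp; ring
  · rw [if_neg h2]
    have h4 : ((b - (a+s) + s - 1) / s).toNat = 0 := by
      have h3 : (b - (a+s) + s - 1) / s < 1 := Int.ediv_lt_of_lt_mul hs (by omega)
      omega
    rw [h4]
    simp

theorem pvChunk_eq (c : Int) (hc : 0 < c) (xs : List Char) :
    (PySem.List.pyRange 0 (PySem.List.len xs) c).map
        (fun i => PySem.List.slice xs (some i) (some (i + c)))
      = pvChunks c.toNat xs := by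
  induction xs using pvChunks.induct c.toNat with
  | case1 =>
    rw [pvChunks]
    simp [PySem.List.len, PySem.List.pyRange_of_pos _ _ hc]
  | case2 x xs ih =>
    rw [pvChunks, pvPyRange_pos_cons _ _ _ hc (by simp [PySem.List.len])]
    rw [List.map_cons]
    congr 1
    · rw [show ((0:Int) + c) = c by ring, PySem.List.slice_zero_start,
          PySem.List.slice_to _ (by omega)]
      rw [show c.toNat = (c.toNat - 1) + 1 by omega]
      simp
    · by_cases hshort : xs.length + 1 ≤ c.toNat
      · have h1 : List.drop (c.toNat - 1) xs = [] := List.drop_eq_nil_of_le (by omega)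
        rw [h1, pvChunks]
        rw [PySem.List.pyRange_of_pos _ _ hc, if_neg (by simp [PySem.List.len]; omega)]
        simp
      · have hys : PySem.List.len (x :: xs) = PySem.List.len (xs.drop (c.toNat - 1)) + c := by
          simp [PySem.List.len]; omega
        rw [hys, show (0 + c : Int) = 0 + c by ring]
        rw [pvPyRange_shift 0 _ c c hc, List.map_map]
        rw [← ih]
        apply List.map_congr_left
        intro i hi
        have hi0 : 0 ≤ i := by
          rcases (PySem.List.mem_pyRange_iff_of_pos hc i).mp hi with ⟨h, _, _⟩
          omega
        simp only [Function.comp]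
        rw [PySem.List.slice_toNat _ (by omega) (by omega),
            PySem.List.slice_toNat _ (by omega) (by omega)]
        rw [List.drop_drop]
        rw [show (i + c + c).toNat - (i + c).toNat = c.toNat by omega,
            show (i + c).toNat - i.toNat = c.toNat by omega,
            show (i + c).toNat = (c.toNat - 1 + i.toNat) + 1 by omega,
            List.drop_succ_cons]

theorem pvRotateLeftList_eq (items : List Char) (amount : Int) :
    pvRotateLeftList items amount = pvRotL items amount := by
  unfold pvRotateLeftList pvRotL
  split
  · rfl
  · rename_i h
    have hpos : (0:Int) < items.length := by
      cases items with | nil => exact absurd rfl h | cons a l => simp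
    have h0 : 0 ≤ PySem.Int.mod amount (PySem.List.len items) :=
      PySem.Int.mod_nonneg _ (by simpa [PySem.List.len] using hpos)
    simp only []
    rw [PySem.List.slice_from _ h0, PySem.List.slice_to _ h0]
    simp [PySem.List.len]

theorem pvBlockRotateAll_eq (text : List Char) (r c : Int) (hc : 0 < c) :
    pvBlockRotateAll text r c = pvBrot text r c.toNat := by
  unfold pvBlockRotateAll pvBrot
  rw [if_neg (by omega)]
  rw [pvRotateLeftList_eq, pvChunk_eq c hc]

theorem pvBrot_eq_map_getD {α : Type} [Inhabited α] (X : List α) (r : Int) (c : Nat) :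
    pvBrot X r c = (pvBrot (List.range X.length) r c).map (fun i => X.getD i default) := by
  conv_lhs => rw [show X = (List.range X.length).map (fun i => X.getD i default) by
    apply List.ext_getElem
    · simp
    · intro i h1 h2
      simp only [List.getElem_map, List.getElem_range]
      rw [List.getD_eq_getElem _ _ (by simpa using h1)]]
  rw [pvBrot_map]

-- marker characters are valid and injective below the Pre_ bound
theorem pvChrF_toNat (j : Nat) (h : j ≤ 1056511) : (pvChrF j).toNat = 0xE100 + j := by
  unfold pvChrF
  rw [Char.toNat_ofNat, if_pos]
  exact Or.inr ⟨by omega, by omega⟩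

theorem pvChrF_inj {a b : Nat} (ha : a ≤ 1056511) (hb : b ≤ 1056511)
    (h : pvChrF a = pvChrF b) : a = b := by
  have := congrArg Char.toNat h
  rw [pvChrF_toNat a ha, pvChrF_toNat b hb] at this
  omega

theorem pvMarkers_eq (L : List Char) :
    (PySem.List.pyRange 0 (PySem.List.len L) 1).map (fun i => Char.ofNat (0xE100 + i.toNat))
      = (List.range L.length).map pvChrF := by
  show (PySem.List.pyRange 0 (PySem.List.len L)).map _ = _
  rw [PySem.List.pyRange_zero]
  simp [PySem.List.len, List.map_map, pvChrF, Function.comp]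

-- the positions dict: get? of a fold of inserts with distinct keys
theorem pvFold_get?_not_mem (ps : List (Int × Char)) :
    ∀ (d : PySem.Dict Char Int) (ch : Char), ch ∉ ps.map (·.2) →
      ((ps.foldl (fun d p => d.insert p.2 p.1) d).get? ch) = d.get? ch := by
  induction ps with
  | nil => intro d ch _; rfl
  | cons q ps ih =>
    intro d ch h
    simp only [List.map_cons, List.mem_cons] at h
    push Not at h
    rw [List.foldl_cons, ih _ _ h.2, PySem.Dict.get?_insert_of_ne _ _ h.1]

theorem pvFold_get?_mem (ps : List (Int × Char)) :
    ∀ (d : PySem.Dict Char Int) (j : Int) (ch : Char), (ps.map (·.2)).Nodup →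
      (j, ch) ∈ ps →
      ((ps.foldl (fun d p => d.insert p.2 p.1) d).get? ch) = some j := by
  induction ps with
  | nil => intro _ _ _ _ h; cases h
  | cons q ps ih =>
    intro d j ch hnd hmem
    simp only [List.map_cons, List.nodup_cons] at hnd
    rw [List.foldl_cons]
    rcases List.mem_cons.mp hmem with heq | htail
    · have hch : ch = q.2 := by rw [← heq]
      have : ch ∉ ps.map (·.2) := by rw [hch]; exact hnd.1
      rw [pvFold_get?_not_mem _ _ _ this, hch, ← heq]
      exact PySem.Dict.get?_insert_self _ _ _
    · exact ih _ j ch hnd.2 htail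

theorem pvPositions_get? (L : List Char) (hn : L.length ≤ 1056512) (j : Nat) (hj : j < L.length) :
    ((PySem.List.enumerate ((List.range L.length).map pvChrF)).foldl
        (fun d p => d.insert p.2 p.1) PySem.Dict.empty).get? (pvChrF j) = some (j : Int) := by
  apply pvFold_get?_mem
  · rw [PySem.List.map_snd_enumerate]
    apply List.Nodup.map_on _ (List.nodup_range)
    intro a ha b hb h
    exact pvChrF_inj (by simp at ha; omega) (by simp at hb; omega) h
  · rw [PySem.List.mem_enumerate_iff]
    refine ⟨j, by simpa using hj, ?_⟩
    simp

-- the rebuild loop is a scatter of output's characters along the index permutation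
theorem pvFoldA (L : List Char) (d : PySem.Dict Char Int)
    (hd : ∀ j : Nat, j < L.length → d.get? (pvChrF j) = some (j : Int)) :
    ∀ (τ : List Nat) (s : Nat) (rb : List String),
      (∀ j ∈ τ, j < L.length) → s + τ.length ≤ L.length →
      ((PySem.List.enumerate (τ.map pvChrF) (s : Int)).foldl
          (fun rb p =>
            match d.get? p.2, PySem.List.pyGet? L p.1 with
            | some idx, some ch => PySem.List.pySetD rb idx (String.ofList [ch])
            | _, _ => rb) rb)
        = (τ.zip ((L.drop s).map (fun ch => String.ofList [ch]))).foldl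
            (fun rb q => rb.set q.1 q.2) rb := by
  intro τ
  induction τ with
  | nil => intro s rb _ _; rfl
  | cons j τ ih =>
    intro s rb hτ hlen
    have hs : s < L.length := by simp at hlen; omega
    rw [List.map_cons, PySem.List.enumerate_cons, List.foldl_cons]
    rw [List.drop_eq_getElem_cons hs, List.map_cons]
    rw [List.zip_cons_cons, List.foldl_cons]
    have h1 : d.get? (pvChrF j) = some ((j:Nat) : Int) := hd j (hτ j (by simp))
    have h2 : PySem.List.pyGet? L (s : Int) = some L[s] := by
      rw [PySem.List.pyGet?_natCast]
      simp [hs]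
    simp only [h1, h2]
    rw [PySem.List.pySetD_natCast]
    have : ((s : Int) + 1) = ((s + 1 : Nat) : Int) := by push_cast; ring
    rw [this, ih (s+1) _ (fun x hx => hτ x (by simp [hx])) (by simp at hlen ⊢; omega)]

theorem pvFoldA_zero (L : List Char) (d : PySem.Dict Char Int)
    (hd : ∀ j : Nat, j < L.length → d.get? (pvChrF j) = some (j : Int))
    (τ : List Nat) (rb : List String)
    (hτ : ∀ j ∈ τ, j < L.length) (hlen : τ.length ≤ L.length) :
    ((PySem.List.enumerate (τ.map pvChrF)).foldl
        (fun rb p =>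
          match d.get? p.2, PySem.List.pyGet? L p.1 with
          | some idx, some ch => PySem.List.pySetD rb idx (String.ofList [ch])
          | _, _ => rb) rb)
      = (τ.zip (L.map (fun ch => String.ofList [ch]))).foldl
          (fun rb q => rb.set q.1 q.2) rb := by
  have h := pvFoldA L d hd τ 0 rb hτ (by omega)
  rw [show ((0 : Nat) : Int) = 0 by norm_num, List.drop_zero] at h
  exact h

-- scatter lemmas
theorem pvScatter_len (zs : List (Nat × String)) :
    ∀ (rb : List String), ((zs.foldl (fun rb q => rb.set q.1 q.2) rb)).length = rb.length := by
  induction zs with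
  | nil => intro rb; rfl
  | cons q zs ih => intro rb; rw [List.foldl_cons, ih]; simp

theorem pvScatter_untouched (zs : List (Nat × String)) :
    ∀ (rb : List String) (j : Nat), (∀ q ∈ zs, q.1 ≠ j) →
      (zs.foldl (fun rb q => rb.set q.1 q.2) rb)[j]? = rb[j]? := by
  induction zs with
  | nil => intro rb j _; rfl
  | cons q zs ih =>
    intro rb j h
    rw [List.foldl_cons, ih _ _ (fun q hq => h q (by simp [hq]))]
    rw [List.getElem?_set_ne (h q (by simp))]

theorem pvScatter_hit (js : List Nat) :
    ∀ (vs : List String) (rb : List String), js.Nodup → (∀ j ∈ js, j < rb.length) →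
      ∀ p ∈ js.zip vs, ((js.zip vs).foldl (fun rb q => rb.set q.1 q.2) rb)[p.1]? = some p.2 := by
  induction js with
  | nil => intro vs rb _ _ p hp; cases hp
  | cons j js ih =>
    intro vs rb hnd hlt p hp
    cases vs with
    | nil => cases hp
    | cons v vs =>
      rw [List.zip_cons_cons] at hp ⊢
      rw [List.foldl_cons]
      simp only [List.nodup_cons] at hnd
      rcases List.mem_cons.mp hp with heq | htail
      · subst heq
        have huntouched : ∀ q ∈ js.zip vs, q.1 ≠ j := by
          intro q hq hcon
          exact hnd.1 (hcon ▸ (List.of_mem_zip hq).1)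
        rw [pvScatter_untouched _ _ _ huntouched]
        exact List.getElem?_set_self (hlt j (by simp))
      · exact ih vs _ hnd.2 (fun x hx => by rw [List.length_set]; exact hlt x (by simp [hx]))
          p htail

-- ===== B-side: the cut-pieces loop =====
def pvPieceGen (L : List Char) : Int → List Int → List (List Char)
  | _, [] => []
  | p, sz :: rest => PySem.List.slice L (some p) (some (p + sz)) :: pvPieceGen L (p + sz) rest

theorem pvFoldB (L : List Char) (sizes : List Int) :
    ∀ (acc : List (List Char)) (p : Int),
      sizes.foldl (fun (st : List (List Char) × Int) size =>
          (st.1 ++ [PySem.List.slice L (some st.2) (some (st.2 + size))], st.2 + size)) (acc, p)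
        = (acc ++ pvPieceGen L p sizes, p + sizes.sum) := by
  induction sizes with
  | nil => intro acc p; simp [pvPieceGen]
  | cons sz rest ih =>
    intro acc p
    rw [List.foldl_cons, ih, pvPieceGen]
    simp
    omega

theorem pvPieceGen_replicate (L : List Char) (c : Int) (hc : 0 < c) :
    ∀ (m : Nat) (p : Nat), p + m * c.toNat = L.length →
      pvPieceGen L (p : Int) (List.replicate m c) = pvChunks c.toNat (L.drop p) := by
  intro m
  induction m with
  | zero =>
    intro p hp
    rw [List.replicate_zero, pvPieceGen, List.drop_eq_nil_of_le (by omega), pvChunks]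
  | succ m ih =>
    intro p hp
    have hexp : (m + 1) * c.toNat = m * c.toNat + c.toNat := Nat.succ_mul m c.toNat
    rw [List.replicate_succ, pvPieceGen]
    have hne : L.drop p ≠ [] := by
      intro h
      have := congrArg List.length h
      simp at this
      omega
    rw [pvChunks_cons_take_drop c.toNat (by omega) _ hne]
    congr 1
    · rw [PySem.List.slice_toNat _ (by omega) (by omega)]
      rw [show ((p:Int) + c).toNat - (p:Int).toNat = c.toNat by omega]
      simp
    · rw [List.drop_drop]
      have : ((p:Int) + c) = ((p + c.toNat : Nat) : Int) := by push_cast; omega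
      rw [this, ih (p + c.toNat) (by omega)]

theorem pvChunks_full (c : Nat) (hc : 0 < c) (ys : List Char) :
    c ∣ ys.length → ∀ p ∈ pvChunks c ys, p.length = c := by
  induction ys using pvChunks.induct c with
  | case1 => intro _ p hp; simp [pvChunks] at hp
  | case2 x xs ih =>
    intro hdvd p hp
    rcases hdvd with ⟨k, hk⟩
    simp only [List.length_cons] at hk
    cases k with
    | zero => simp at hk
    | succ k' =>
      have hms : c * (k' + 1) = c * k' + c := Nat.mul_succ c k'
      rw [pvChunks] at hp
      rcases List.mem_cons.mp hp with heq | htail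
      · subst heq
        simp
        omega
      · exact ih ⟨k', by simp [List.length_drop]; omega⟩ p htail

theorem pvChunks_of_flatten (c : Nat) (hc : 0 < c) (lastp : List Char) :
    ∀ (ls : List (List Char)), (∀ p ∈ ls, p.length = c) → 0 < lastp.length → lastp.length ≤ c →
      pvChunks c ((ls ++ [lastp]).flatten) = ls ++ [lastp] := by
  intro ls
  induction ls with
  | nil =>
    intro _ h1 h2
    cases lastp with
    | nil => simp at h1
    | cons x xs =>
      simp only [List.nil_append, List.flatten_cons, List.flatten_nil, List.append_nil]
      rw [pvChunks]
      simp at h2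
      rw [List.take_of_length_le (by omega), List.drop_eq_nil_of_le (by omega), pvChunks]
  | cons q ls ih =>
    intro hq h1 h2
    have hqlen : q.length = c := hq q (by simp)
    have hne : (((q :: ls) ++ [lastp]).flatten) ≠ [] := by
      simp only [List.cons_append, List.flatten_cons]
      intro h
      rw [List.append_eq_nil_iff] at h
      rcases h with ⟨hq0, _⟩
      rw [hq0] at hqlen
      simp at hqlen
      omega
    rw [pvChunks_cons_take_drop c hc _ hne]
    simp only [List.cons_append, List.flatten_cons]
    rw [List.take_left' (by omega), List.drop_left' (by omega)]
    rw [ih (fun p hp => hq p (by simp [hp])) h1 h2]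

-- join of singleton strings
theorem pvJoin_singletons (cs : List Char) :
    PySem.Str.join "" (cs.map (fun ch => String.ofList [ch])) = String.ofList cs := by
  unfold PySem.Str.join PySem.Chars.join
  congr 1
  have h0 : ("" : String).toList = [] := rfl
  rw [h0]
  have : ∀ (ls : List (List Char)), List.intercalate [] ls = ls.flatten := by
    intro ls
    induction ls with
    | nil => rfl
    | cons x xs ihx => cases xs <;> simp_all [List.intercalate, List.intersperse]
  rw [List.map_map, this]
  have : (String.toList ∘ fun ch => String.ofList [ch]) = fun ch => [ch] := by
    funext ch
    simp [String.toList_ofList]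
  rw [this]
  induction cs with
  | nil => rfl
  | cons x xs ihx => simp_all

-- ===== B-side core characterisation =====
def pvAltChars (L : List Char) (r c : Int) : List Char :=
  let n : Int := L.length
  let k : Int := -(PySem.Int.floordiv (-n) c)
  let sizes : List Int := (n - c * (k - 1)) :: List.replicate (k - 1).toNat c
  let pieces := pvPieceGen L 0 sizes
  let s := pieces.reverse.flatten
  let cut := n - PySem.Int.mod r n
  PySem.List.slice s (some cut) none ++ PySem.List.slice s none (some cut)

theorem pvAlt_eq (output : String) (r c : Int) (hc : 0 < c) (hne : output.toList ≠ []) :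
    invert_block_rotate_all_alt output r c = String.ofList (pvAltChars output.toList r c) := by
  unfold invert_block_rotate_all_alt pvAltChars
  rw [if_neg (by omega), if_neg hne]
  simp only [PySem.List.len, pvFoldB]
  rfl

theorem pvAltChars_spec (L : List Char) (hne : L ≠ []) (r c : Int) (hc : 0 < c) :
    (pvAltChars L r c).length = L.length ∧ pvBrot (pvAltChars L r c) r c.toNat = L := by
  have hn0 : 0 < L.length := List.length_pos_of_ne_nil hne
  set n : Int := (L.length : Int) with hn
  have hnpos : (0:Int) < n := by omega
  set k : Int := -(PySem.Int.floordiv (-n) c) with hkdef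
  have hk : (k - 1) * c < n ∧ n ≤ k * c :=
    (PySem.Int.neg_floordiv_neg_eq_iff_of_pos hc).mp hkdef.symm
  have hk1 : 1 ≤ k := by
    by_contra h
    push Not at h
    have : k * c ≤ 0 := mul_nonpos_iff.mpr (Or.inr ⟨by omega, by omega⟩)
    omega
  set l : Int := n - c * (k - 1) with hldef
  have hmulcomm : (k - 1) * c = c * (k - 1) := by ring
  have hkc : k * c = c * (k - 1) + c := by ring
  have hl : 0 < l ∧ l ≤ c := by constructor <;> omega
  set m : Nat := (k - 1).toNat with hmdef
  have hmc : (m : Int) = k - 1 := by omega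
  have hml : l.toNat + m * c.toNat = L.length := by
    have h1 : ((m * c.toNat : Nat) : Int) = (m : Int) * (c.toNat : Int) := by push_cast; ring
    have h2 : (m : Int) * (c.toNat : Int) = (k - 1) * c := by rw [hmc]; congr 1; omega
    omega
  have hln : l ≤ n := by
    have : 0 ≤ c * (k - 1) := mul_nonneg (by omega) (by omega)
    omega
  -- the pieces
  have hpieces : pvPieceGen L 0 (l :: List.replicate m c)
      = L.take l.toNat :: pvChunks c.toNat (L.drop l.toNat) := by
    rw [pvPieceGen]
    congr 1
    · rw [show (0 : Int) + l = l by ring, PySem.List.slice_zero_start,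
          PySem.List.slice_to _ (by omega)]
    · rw [show (0 : Int) + l = ((l.toNat : Nat) : Int) by omega]
      exact pvPieceGen_replicate L c hc m l.toNat hml
  have hfullchunks : ∀ p ∈ pvChunks c.toNat (L.drop l.toNat), p.length = c.toNat := by
    apply pvChunks_full c.toNat (by omega)
    refine ⟨m, ?_⟩
    have := Nat.mul_comm c.toNat m
    simp [List.length_drop]
    omega
  -- unfold pvAltChars
  unfold pvAltChars
  simp only [← hn, ← hkdef, ← hldef, ← hmdef, hpieces]
  set ls : List (List Char) := (pvChunks c.toNat (L.drop l.toNat)).reverse with hlsdef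
  have hrev : (L.take l.toNat :: pvChunks c.toNat (L.drop l.toNat)).reverse
      = ls ++ [L.take l.toNat] := by rw [List.reverse_cons]
  rw [hrev]
  set s : List Char := (ls ++ [L.take l.toNat]).flatten with hsdef
  have hflat : (L.take l.toNat :: pvChunks c.toNat (L.drop l.toNat)).flatten = L := by
    rw [List.flatten_cons, pvChunks_flatten, List.take_append_drop]
  have hsperm : s.Perm L := by
    rw [hsdef, ← hrev]
    refine (List.reverse_perm _).flatten.trans ?_
    rw [hflat]
  have hslen : s.length = L.length := hsperm.length_eq
  -- the rotation amounts
  set sh : Int := PySem.Int.mod r n with hshdef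
  have hsh : 0 ≤ sh ∧ sh < n := ⟨PySem.Int.mod_nonneg _ hnpos, PySem.Int.mod_lt _ hnpos⟩
  set cut : Int := n - sh with hcutdef
  have hcut : 0 < cut ∧ cut ≤ n := by constructor <;> omega
  set u : Nat := cut.toNat with hudef
  have hB : PySem.List.slice s (some cut) none ++ PySem.List.slice s none (some cut)
      = s.drop u ++ s.take u := by
    rw [PySem.List.slice_from _ (by omega), PySem.List.slice_to _ (by omega)]
  rw [hB]
  set B : List Char := s.drop u ++ s.take u with hBdef
  have hulen : u ≤ s.length := by simp [hslen]; omega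
  have hBlen : B.length = L.length := by
    simp [hBdef, List.length_append, List.length_drop, List.length_take]
    omega
  refine ⟨hBlen, ?_⟩
  -- rotating B left by sh recovers s
  have hrot : pvRotL B r = s := by
    unfold pvRotL
    rw [if_neg (List.ne_nil_of_length_pos (by omega))]
    have hB1 : (B.length : Int) = n := by rw [hBlen]
    rw [hB1, ← hshdef]
    have hdlen : (s.drop u).length = sh.toNat := by
      simp [List.length_drop, hslen]
      omega
    simp only [hBdef]
    rw [List.drop_left' hdlen, List.take_left' hdlen, List.take_append_drop]
  -- re-chunking s recovers the reversed pieces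
  have hchunk : pvChunks c.toNat s = ls ++ [L.take l.toNat] := by
    rw [hsdef]
    apply pvChunks_of_flatten c.toNat (by omega)
    · intro p hp
      exact hfullchunks p (List.mem_reverse.mp hp)
    · simp
      omega
    · simp
      omega
  unfold pvBrot
  rw [hrot, hchunk, List.reverse_append, List.reverse_singleton, List.singleton_append,
      List.flatten_cons, hlsdef, List.reverse_reverse, pvChunks_flatten, List.take_append_drop]

-- ===== final assembly =====
theorem pvMain (output : String) (r c : Int) (hc : 0 < c)
    (hn : output.toList.length ≤ 1056512) :
    invert_block_rotate_all output r c = invert_block_rotate_all_alt output r c := by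
  by_cases hL : output.toList = []
  · -- empty output: both sides are ""
    unfold invert_block_rotate_all invert_block_rotate_all_alt
    rw [if_neg (by omega : ¬ c ≤ 0), if_pos hL]
    simp only [hL]
    rw [pvMarkers_eq]
    simp only [List.length_nil, List.range_zero, List.map_nil]
    have htr : pvBlockRotateAll [] r c = [] := by
      rw [pvBlockRotateAll_eq _ _ _ hc]
      unfold pvBrot pvRotL
      rw [if_pos rfl, pvChunks]
      rfl
    rw [htr]
    rfl
  · set L := output.toList with hLdef
    have hn0 : 0 < L.length := List.length_pos_of_ne_nil hL
    set n' : Nat := L.length with hn'def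
    set single : Char → String := fun ch => String.ofList [ch] with hsingle
    obtain ⟨hBlen, hBbrot⟩ := pvAltChars_spec L hL r c hc
    set Bc : List Char := pvAltChars L r c with hBcdef
    set σ : List Nat := pvBrot (List.range n') r c.toNat with hσdef
    have hσperm : σ.Perm (List.range n') := pvBrot_perm _ r _
    have hσlen : σ.length = n' := by rw [hσperm.length_eq, List.length_range]
    have hσmem : ∀ j ∈ σ, j < n' := by
      intro j hj
      have := hσperm.mem_iff.mp hj
      simpa using this
    have hσnodup : σ.Nodup := hσperm.nodup_iff.mpr (List.nodup_range)
    -- A's transformed string is the marker image of the index permutation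
    have htrans : pvBlockRotateAll ((List.range n').map pvChrF) r c = σ.map pvChrF := by
      rw [pvBlockRotateAll_eq _ _ _ hc, pvBrot_map]
    -- A's loop scatters output's characters
    have hA : invert_block_rotate_all output r c
        = PySem.Str.join "" ((σ.zip (L.map single)).foldl
            (fun rb q => rb.set q.1 q.2) (List.replicate n' "")) := by
      simp only [invert_block_rotate_all]
      rw [← hLdef, pvMarkers_eq, htrans,
          pvFoldA_zero L _ (fun j hj => pvPositions_get? L hn j hj) σ _ hσmem (by omega)]
    -- the scattered list is exactly B's characters, as singleton strings
    have hscatter : (σ.zip (L.map single)).foldl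
        (fun rb q => rb.set q.1 q.2) (List.replicate n' "") = Bc.map single := by
      apply List.ext_getElem
      · rw [pvScatter_len, List.length_replicate, List.length_map, hBlen]
      · intro i h1 h2
        rw [pvScatter_len, List.length_replicate] at h1
        have hiσ : i ∈ σ := hσperm.mem_iff.mpr (List.mem_range.mpr h1)
        obtain ⟨t, ht, hσt⟩ := List.getElem_of_mem hiσ
        have htn : t < n' := by omega
        have hzlen : t < (σ.zip (L.map single)).length := by
          rw [List.length_zip, hσlen, List.length_map]
          omega
        have hm := List.getElem_mem hzlen
        rw [List.getElem_zip] at hm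
        rw [List.getElem_map] at hm
        have hit := pvScatter_hit σ (L.map single) (List.replicate n' "") hσnodup
          (by intro j hj; rw [List.length_replicate]; exact hσmem j hj) _ hm
        simp only at hit
        rw [hσt] at hit
        have hflen : i < ((σ.zip (L.map single)).foldl (fun rb q => rb.set q.1 q.2)
            (List.replicate n' "")).length := by
          rw [pvScatter_len, List.length_replicate]; omega
        have hfold : ((σ.zip (L.map single)).foldl (fun rb q => rb.set q.1 q.2)
            (List.replicate n' ""))[i]'hflen = single (L[t]'(by omega)) := by
          have h3 := List.getElem?_eq_getElem hflen
          rw [h3] at hit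
          exact Option.some.inj hit
        rw [hfold]
        -- B's character at position i is output's character at t
        have hmapform : L = σ.map (fun idx => Bc.getD idx default) := by
          rw [← hBbrot, pvBrot_eq_map_getD, hBlen]
        have hiB : i < Bc.length := by rw [hBlen]; omega
        have hLt : L[t]'(by omega) = Bc.getD i default := by
          have h4 := congrArg (fun ys => ys.getD t default) hmapform
          simp only at h4
          rw [List.getD_eq_getElem _ _ (by omega : t < L.length)] at h4
          rw [List.getD_eq_getElem _ _ (by rw [List.length_map, hσlen]; omega),
              List.getElem_map] at h4
          rw [hσt] at h4
          exact h4
        rw [List.getElem_map, hLt, List.getD_eq_getElem _ _ hiB]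
    rw [hA, hscatter, hsingle, pvJoin_singletons]
    rw [pvAlt_eq output r c hc hL]

-- ===== VERDICT (by name: the statement is the Claim_ definition above) =====
theorem invert_block_rotate_all_spec : Claim_equal_invert_block_rotate_all := by
  intro output rotate_amount chunk _ hpre
  unfold Spec_invert_block_rotate_all
  exact pvMain output rotate_amount chunk hpre.1 hpre.2
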